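-- pv_equiv track=rewrite | github.com/omershreib/net_seminar | detection/system/charts/aspath_charts_maker.py | assign_level
-- ===== SOURCE A (Python) =====
-- def assign_level(nodes, as_relationships):
--     levels = {}
--     current_level = 0
--     prev_node = None
--
--     for node in nodes:
--         if not prev_node:
--             prev_node = node
--             levels[node] = current_level
--             continue
--
--         if node in as_relationships[prev_node]['customers']:
--             current_level -= 1
--             levels[node] = current_level
--             prev_node = node
--             continue
--
--         if node in as_relationships[prev_node]['providers']:
--             current_level += 1
--             levels[node] = current_level
--             prev_node = node
--             continue
--
--         prev_node = node
--         levels[node] = current_level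
--         continue
--
--     return levels
-- ===== SOURCE B (Python) =====
-- def assign_level(nodes, as_relationships):
--     def delta(prev, node):
--         if not prev:
--             return 0
--         rels = as_relationships[prev]
--         if node in rels['customers']:
--             return -1
--         if node in rels['providers']:
--             return 1
--         return 0
--
--     # Levels of a path defined structurally: the head is at 0, and the whole
--     # tail path's levels are those of the tail (computed recursively, head at 0)
--     # shifted by the first pair's delta.  No running accumulator.
--     def rel_levels(path):
--         if len(path) <= 1:
--             return [0] * len(path)
--         d = delta(path[0], path[1])
--         return [0] + [d + x for x in rel_levels(path[1:])]
--
--     return dict(zip(nodes, rel_levels(nodes)))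
-- ===== Notes on version B (the rewrite author's own statement) =====
-- stated objective: alternative
-- what changed: Replaces A's single stateful loop (mutable current_level/prev_node threaded through four branches) by a structural recursion on the path: levels(path) = [0] ++ (levels(tail) each shifted by the first pair's delta), with no running accumulator, then dict(zip(nodes, levels)).
import Mathlib
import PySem

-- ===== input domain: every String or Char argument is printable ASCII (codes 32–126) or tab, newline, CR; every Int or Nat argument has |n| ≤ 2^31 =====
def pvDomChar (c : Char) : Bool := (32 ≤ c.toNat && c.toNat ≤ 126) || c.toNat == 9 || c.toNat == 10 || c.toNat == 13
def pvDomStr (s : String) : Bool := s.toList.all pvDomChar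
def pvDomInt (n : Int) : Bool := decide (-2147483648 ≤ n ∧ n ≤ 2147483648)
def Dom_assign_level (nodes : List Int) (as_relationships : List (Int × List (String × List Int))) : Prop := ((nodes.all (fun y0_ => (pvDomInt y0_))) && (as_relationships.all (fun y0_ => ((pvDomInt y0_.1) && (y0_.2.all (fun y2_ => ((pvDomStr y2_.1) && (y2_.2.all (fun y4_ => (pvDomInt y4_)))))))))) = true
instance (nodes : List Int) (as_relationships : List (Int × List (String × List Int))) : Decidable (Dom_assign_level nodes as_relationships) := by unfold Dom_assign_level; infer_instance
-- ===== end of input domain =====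

-- B is an 'alternative': a structural recursion on the path (levels of a path = 0 followed by the
-- tail path's levels, all shifted by the first pair's delta) instead of A's single stateful loop.

-- ===== PORT A =====
-- A's loop, threading the mutable state (levels, current_level, prev_node) exactly as the Python does.
-- Dict lookups as_relationships[prev]['customers'/'providers'] are done with getD; inputs where
-- Python would raise KeyError there are excluded by Pre_assign_level.
def assign_level_loop (rel : PySem.Dict Int (PySem.Dict String (List Int)))
    (rest : List Int) (levels : PySem.Dict Int Int) (current_level : Int)
    (prev_node : Option Int) : PySem.Dict Int Int :=
  match rest with
  | [] => levels
  | node :: rest =>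
    match prev_node with
    | none =>
        assign_level_loop rel rest (levels.insert node current_level) current_level (some node)
    | some p =>
        if p = 0 then  -- `not prev_node`: 0 is falsy
          assign_level_loop rel rest (levels.insert node current_level) current_level (some node)
        else if ((rel.getD p PySem.Dict.empty).getD "customers" []).contains node then
          assign_level_loop rel rest (levels.insert node (current_level - 1)) (current_level - 1) (some node)
        else if ((rel.getD p PySem.Dict.empty).getD "providers" []).contains node then
          assign_level_loop rel rest (levels.insert node (current_level + 1)) (current_level + 1) (some node)
        else
          assign_level_loop rel rest (levels.insert node current_level) current_level (some node)

def assign_level (nodes : List Int) (as_relationships : List (Int × List (String × List Int))) : List (Int × Int) :=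
  let rel : PySem.Dict Int (PySem.Dict String (List Int)) :=
    PySem.Dict.mk (as_relationships.map (fun p => (p.1, PySem.Dict.mk p.2)))
  (assign_level_loop rel nodes PySem.Dict.empty 0 none).items

-- ===== PORT B =====
-- Source B's delta(prev, node): the delta contributed by one consecutive pair.
def assign_level_delta (rel : PySem.Dict Int (PySem.Dict String (List Int))) (prev node : Int) : Int :=
  if prev = 0 then 0   -- `not prev`
  else
    let rels := rel.getD prev PySem.Dict.empty
    if (rels.getD "customers" []).contains node then -1
    else if (rels.getD "providers" []).contains node then 1
    else 0

-- Source B's rel_levels(path): structural recursion, shifting the whole recursively computed suffix.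
def assign_level_relLevels (rel : PySem.Dict Int (PySem.Dict String (List Int))) : List Int → List Int
  | [] => []
  | [_] => [0]
  | n :: m :: t =>
      let d := assign_level_delta rel n m
      0 :: (assign_level_relLevels rel (m :: t)).map (fun x => d + x)

def assign_level_alt (nodes : List Int) (as_relationships : List (Int × List (String × List Int))) : List (Int × Int) :=
  let rel : PySem.Dict Int (PySem.Dict String (List Int)) :=
    PySem.Dict.mk (as_relationships.map (fun p => (p.1, PySem.Dict.mk p.2)))
  ((nodes.zip (assign_level_relLevels rel nodes)).foldl
      (fun (d : PySem.Dict Int Int) p => d.insert p.1 p.2) PySem.Dict.empty).items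

-- ===== PRECONDITION & SPEC =====
-- Pre_ excludes exactly the inputs where Python A raises KeyError: some consecutive pair has a
-- nonzero (truthy) predecessor that is missing from as_relationships, or whose dict lacks
-- 'customers', or (when the customers test fails) lacks 'providers'.
def Pre_assign_level (nodes : List Int) (as_relationships : List (Int × List (String × List Int))) : Prop :=
  ∀ pr ∈ nodes.zip nodes.tail, pr.1 ≠ 0 →
    let rel : PySem.Dict Int (PySem.Dict String (List Int)) :=
      PySem.Dict.mk (as_relationships.map (fun p => (p.1, PySem.Dict.mk p.2)))
    rel.contains pr.1 = true ∧
    (rel.getD pr.1 PySem.Dict.empty).contains "customers" = true ∧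
    (((rel.getD pr.1 PySem.Dict.empty).getD "customers" []).contains pr.2 = true ∨
      (rel.getD pr.1 PySem.Dict.empty).contains "providers" = true)
instance (nodes : List Int) (as_relationships : List (Int × List (String × List Int))) : Decidable (Pre_assign_level nodes as_relationships) := by unfold Pre_assign_level; infer_instance

def pvWitness_assign_level : List Int × (List (Int × List (String × List Int))) :=
  ([1, 2, 2, 3], [(1, [("customers", [2]), ("providers", [])]),
                  (2, [("customers", []), ("providers", [3])]),
                  (3, [("customers", []), ("providers", [])])])

def Spec_assign_level (nodes : List Int) (as_relationships : List (Int × List (String × List Int))) (out : List (Int × Int)) : Prop := out = assign_level_alt nodes as_relationships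
instance (nodes : List Int) (as_relationships : List (Int × List (String × List Int))) (out : List (Int × Int)) : Decidable (Spec_assign_level nodes as_relationships out) := by unfold Spec_assign_level; infer_instance

-- ===== CLAIM (what is proved, stated in full; the proofs are below) =====
def Claim_equal_assign_level : Prop := ∀ (nodes : List Int) (as_relationships : List (Int × List (String × List Int))), Dom_assign_level nodes as_relationships → Pre_assign_level nodes as_relationships → Spec_assign_level nodes as_relationships (assign_level nodes as_relationships)

-- ===== LEMMAS AND PROOFS =====

-- Proof-side closed form of A's levels trail: the running level after each consecutive pair.
def levelsFrom (rel : PySem.Dict Int (PySem.Dict String (List Int))) (cur prev : Int) : List Int → List Int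
  | [] => []
  | n :: t => (cur + assign_level_delta rel prev n) :: levelsFrom rel (cur + assign_level_delta rel prev n) n t

theorem levelsFrom_shift (rel : PySem.Dict Int (PySem.Dict String (List Int)))
    (t : List Int) (d c p : Int) :
    levelsFrom rel (d + c) p t = (levelsFrom rel c p t).map (fun x => d + x) := by
  induction t generalizing c p with
  | nil => simp [levelsFrom]
  | cons n t ih =>
    simp only [levelsFrom, List.map_cons, add_assoc]
    rw [ih]

theorem relLevels_eq (rel : PySem.Dict Int (PySem.Dict String (List Int)))
    (rest : List Int) (p : Int) :
    assign_level_relLevels rel (p :: rest) = 0 :: levelsFrom rel 0 p rest := by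
  induction rest generalizing p with
  | nil => simp [assign_level_relLevels, levelsFrom]
  | cons m t ih =>
    simp only [assign_level_relLevels, ih, levelsFrom, List.map_cons, add_zero]
    rw [← levelsFrom_shift rel t (assign_level_delta rel p m) 0 m]
    simp

theorem loop_eq_foldl (rel : PySem.Dict Int (PySem.Dict String (List Int)))
    (rest : List Int) (prev cur : Int) (levels : PySem.Dict Int Int) :
    assign_level_loop rel rest levels cur (some prev)
      = ((rest.zip (levelsFrom rel cur prev rest)).foldl
          (fun (d : PySem.Dict Int Int) p => d.insert p.1 p.2) levels) := by
  induction rest generalizing prev cur levels with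
  | nil => simp [assign_level_loop, levelsFrom]
  | cons n t ih =>
    by_cases h0 : prev = 0
    · simp [assign_level_loop, levelsFrom, assign_level_delta, h0, ih]
    · by_cases hc : n ∈ (rel.getD prev PySem.Dict.empty).getD "customers" []
      · simp [assign_level_loop, levelsFrom, assign_level_delta, h0, hc, ih, sub_eq_add_neg]
      · by_cases hp : n ∈ (rel.getD prev PySem.Dict.empty).getD "providers" []
        · simp [assign_level_loop, levelsFrom, assign_level_delta, h0, hc, hp, ih]
        · simp [assign_level_loop, levelsFrom, assign_level_delta, h0, hc, hp, ih]

-- ===== VERDICT (by name: the statement is the Claim_ definition above) =====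
theorem assign_level_spec : Claim_equal_assign_level := by
  intro nodes rel _ _
  unfold Spec_assign_level assign_level assign_level_alt
  cases nodes with
  | nil => rfl
  | cons n0 rest =>
    simp only [relLevels_eq, List.zip_cons_cons, List.foldl_cons]
    rw [show assign_level_loop _ (n0 :: rest) PySem.Dict.empty 0 none
        = assign_level_loop _ rest (PySem.Dict.empty.insert n0 0) 0 (some n0) from rfl,
      loop_eq_foldl]
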